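-- pv_equiv track=rewrite | github.com/Kokemater/Poker_tools | src/AI/postflop.py | is_straight_project_2_puntas
-- ===== SOURCE A (Python) =====
-- def filter_empty_cards(board):
-- 	return [card for card in board if card != "00"]
--
-- def card_value(card):
-- 	values = {'2': 2, '3': 3, '4': 4, '5': 5, '6': 6, '7': 7, '8': 8, '9': 9,
-- 			  't': 10, 'j': 11, 'q': 12, 'k': 13, 'a': 14}
-- 	return values[card[0].lower()]
--
-- def is_straight_project_2_puntas(hand, board):
-- 	board = filter_empty_cards(board)
-- 	values = sorted(set(card_value(card) for card in hand + board))
-- 	if len(values) >= 5: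
-- 		# Check if 2-punta straight is possible
-- 		for i in range(len(values) - 4):
-- 			if values[i:i+5] == list(range(values[i], values[i] + 5)):
-- 				return True
-- 	return False
-- ===== SOURCE B (Python) =====
-- def filter_empty_cards(board):
-- 	return [card for card in board if card != "00"]
--
-- def card_value(card):
-- 	values = {'2': 2, '3': 3, '4': 4, '5': 5, '6': 6, '7': 7, '8': 8, '9': 9,
-- 			  't': 10, 'j': 11, 'q': 12, 'k': 13, 'a': 14}
-- 	return values[card[0].lower()]
--
-- def is_straight_project_2_puntas(hand, board):
-- 	board = filter_empty_cards(board)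
-- 	mask = 0
-- 	for card in hand + board:
-- 		mask |= 1 << card_value(card)
-- 	runs = mask & (mask >> 1) & (mask >> 2) & (mask >> 3) & (mask >> 4)
-- 	return runs != 0
-- ===== Notes on version B (the rewrite author's own statement) =====
-- stated objective: alternative
-- what changed: Replaces sort-then-sliding-window (sorted distinct values, comparing each 5-slice to a range list) with a bitmask of present ranks: one pass ORs 1<<value into a mask, then five shifted ANDs detect any 5 consecutive set bits; no sort, no set, no window comparison. Pre_ excludes only inputs on which card_value raises (empty card string or unknown rank char); B raises there too.
import Mathlib
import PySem

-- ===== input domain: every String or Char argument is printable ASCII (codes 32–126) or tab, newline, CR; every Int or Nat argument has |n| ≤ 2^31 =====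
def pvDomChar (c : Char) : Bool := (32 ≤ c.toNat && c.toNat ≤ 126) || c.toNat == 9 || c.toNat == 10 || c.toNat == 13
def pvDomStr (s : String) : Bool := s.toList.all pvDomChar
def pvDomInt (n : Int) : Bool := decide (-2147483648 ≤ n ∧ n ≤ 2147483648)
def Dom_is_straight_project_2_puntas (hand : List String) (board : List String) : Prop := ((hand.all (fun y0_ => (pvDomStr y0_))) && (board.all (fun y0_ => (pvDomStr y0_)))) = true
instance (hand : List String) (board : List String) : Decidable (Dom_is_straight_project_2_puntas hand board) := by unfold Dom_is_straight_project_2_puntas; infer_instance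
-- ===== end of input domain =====

-- B replaces A's sort + sliced-window/range comparison by a rank bitmask: OR in 1<<value per card,
-- then five shifted ANDs detect five consecutive present ranks (alternative algorithm; same return value).

-- ===== PORT A =====
-- filter_empty_cards
def pvFilterEmpty (board : List String) : List String :=
  board.filter (fun card => card ≠ "00")

-- card_value, Option form: none exactly where Python raises (IndexError on "", KeyError on unknown rank char)
def pvCardValue? (card : String) : Option Int :=
  match card.toList with
  | [] => none
  | c :: _ =>
    ([('2', (2:Int)), ('3', 3), ('4', 4), ('5', 5), ('6', 6), ('7', 7), ('8', 8), ('9', 9),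
      ('t', 10), ('j', 11), ('q', 12), ('k', 13), ('a', 14)]).lookup ((PySem.Chars.lower [c]).headD c)

-- total form used by both ports; Pre_ guarantees the default is never taken
def pvCardValue (card : String) : Int := (pvCardValue? card).getD 0

def is_straight_project_2_puntas (hand : List String) (board : List String) : Bool :=
  let board' := pvFilterEmpty board
  let values := PySem.List.sorted (PySem.Set.ofList ((hand ++ board').map pvCardValue)) (fun x => x) false
  if 5 ≤ values.length then
    (PySem.List.pyRange 0 ((values.length : Int) - 4) 1).any (fun i =>
      PySem.List.slice values (some i) (some (i + 5)) ==
        PySem.List.pyRange (PySem.List.pyGetD values i 0) (PySem.List.pyGetD values i 0 + 5) 1)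
  else false

-- ===== PORT B =====
-- Python's 'mask |= 1 << card_value(card)': under Pre_ every card_value is 2..14, so the Nat
-- shift with '.toNat' is exact there.
def is_straight_project_2_puntas_alt (hand : List String) (board : List String) : Bool :=
  let board' := pvFilterEmpty board
  let mask : Nat := (hand ++ board').foldl (fun m card => m ||| (1 <<< (pvCardValue card).toNat)) 0
  let runs := mask &&& (mask >>> 1) &&& (mask >>> 2) &&& (mask >>> 3) &&& (mask >>> 4)
  runs != 0

-- ===== PRECONDITION & SPEC =====
-- Pre_ excludes exactly the inputs where Python A raises: a card (in hand, or in board and ≠ "00")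
-- that is empty (IndexError) or whose first character is not a rank (KeyError). B raises identically there.
def Pre_is_straight_project_2_puntas (hand : List String) (board : List String) : Prop :=
  ((hand ++ pvFilterEmpty board).all (fun card => (pvCardValue? card).isSome)) = true
instance (hand : List String) (board : List String) : Decidable (Pre_is_straight_project_2_puntas hand board) := by unfold Pre_is_straight_project_2_puntas; infer_instance

def pvWitness_is_straight_project_2_puntas : List String × List String :=
  (["2h", "3d"], ["4s", "00", "5c", "6h"])

def Spec_is_straight_project_2_puntas (hand : List String) (board : List String) (out : Bool) : Prop := out = is_straight_project_2_puntas_alt hand board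
instance (hand : List String) (board : List String) (out : Bool) : Decidable (Spec_is_straight_project_2_puntas hand board out) := by unfold Spec_is_straight_project_2_puntas; infer_instance

-- ===== CLAIM (what is proved, stated in full; the proofs are below) =====
def Claim_equal_is_straight_project_2_puntas : Prop := ∀ (hand : List String) (board : List String), Dom_is_straight_project_2_puntas hand board → Pre_is_straight_project_2_puntas hand board → Spec_is_straight_project_2_puntas hand board (is_straight_project_2_puntas hand board)

-- ===== LEMMAS AND PROOFS =====

-- under Pre_, every card value is a rank value 2..14
theorem pvCardValueBounds {card : String} {v : Int} (h : pvCardValue? card = some v) :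
    2 ≤ v ∧ v ≤ 14 := by
  unfold pvCardValue? at h
  cases hc : card.toList with
  | nil => rw [hc] at h; simp at h
  | cons c rest =>
    rw [hc] at h
    simp only [List.lookup] at h
    repeat' split at h
    all_goals simp_all
    all_goals omega

-- In a strictly increasing Int list, if L[j]+1 occurs it occurs at index j+1.
theorem pvNextIdx (L : List Int) (hpw : L.Pairwise (· < ·)) {j : Nat} (hj : j < L.length)
    (h : L[j] + 1 ∈ L) : ∃ h' : j + 1 < L.length, L[j + 1] = L[j] + 1 := by
  obtain ⟨j', hj', he⟩ := List.mem_iff_getElem.mp h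
  have pw := List.pairwise_iff_getElem.mp hpw
  have hlt : j < j' := by
    by_contra hn
    have hn' : j' ≤ j := Nat.le_of_not_lt hn
    rcases Nat.lt_or_ge j' j with hc | hc
    · have := pw j' j hj' hj hc
      omega
    · have : j' = j := by omega
      subst this
      omega
  have h1 : j + 1 < L.length := by omega
  refine ⟨h1, ?_⟩
  by_cases hc : j + 1 = j'
  · subst hc; exact he
  · have hlt2 : j + 1 < j' := by omega
    have a2 := pw (j + 1) j' h1 hj' hlt2
    have a1 := pw j (j + 1) hj h1 (by omega)
    omega

theorem pvPyRange5 (v : Int) : PySem.List.pyRange v (v + 5) 1 = [v, v + 1, v + 2, v + 3, v + 4] := by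
  rw [PySem.List.pyRange_one_cons (by omega), PySem.List.pyRange_one_cons (by omega),
      PySem.List.pyRange_one_cons (by omega), PySem.List.pyRange_one_cons (by omega),
      PySem.List.pyRange_one_cons (by omega), PySem.List.pyRange_one_eq_nil (by omega)]
  norm_num
  omega

theorem pvSlice5 (L : List Int) (i : Nat) (h : i + 4 < L.length) :
    PySem.List.slice L (some (i : Int)) (some ((i : Int) + 5)) =
      [L[i], L[i + 1], L[i + 2], L[i + 3], L[i + 4]] := by
  have hcast : ((i : Int) + 5) = (((i + 5 : Nat)) : Int) := by push_cast; ring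
  rw [hcast, PySem.List.slice_natCast]
  have hd : L.drop i = L[i] :: L[i + 1] :: L[i + 2] :: L[i + 3] :: L[i + 4] :: L.drop (i + 5) := by
    rw [List.drop_eq_getElem_cons (by omega), List.drop_eq_getElem_cons (by omega),
        List.drop_eq_getElem_cons (by omega), List.drop_eq_getElem_cons (by omega),
        List.drop_eq_getElem_cons (by omega)]
  have h5 : i + 5 - i = 5 := by omega
  rw [h5, hd]
  rfl

-- the common characterisation: a run v, v+1, …, v+4 among the values
def pvHasRun (S : List Int) : Prop :=
  ∃ v ∈ S, v + 1 ∈ S ∧ v + 2 ∈ S ∧ v + 3 ∈ S ∧ v + 4 ∈ S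

-- A's loop finds a straight iff a run of five consecutive values exists
theorem pvA_iff (xs : List Int) :
    ((let values := PySem.List.sorted (PySem.Set.ofList xs) (fun x => x) false
      if 5 ≤ values.length then
        (PySem.List.pyRange 0 ((values.length : Int) - 4) 1).any (fun i =>
          PySem.List.slice values (some i) (some (i + 5)) ==
            PySem.List.pyRange (PySem.List.pyGetD values i 0) (PySem.List.pyGetD values i 0 + 5) 1)
      else false) = true) ↔ pvHasRun (PySem.Set.ofList xs) := by
  set S := PySem.Set.ofList xs with hS
  set L := PySem.List.sorted S (fun x => x) false with hL
  have hmem : ∀ a : Int, a ∈ L ↔ a ∈ S := fun a => PySem.List.mem_sorted S (fun x => x) false a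
  have hpw : L.Pairwise (· < ·) := PySem.List.sorted_ofList_pairwise_lt xs
  constructor
  · intro hif
    by_cases hlen : 5 ≤ L.length
    · rw [if_pos hlen, List.any_eq_true] at hif
      obtain ⟨i, _, hcond⟩ := hif
      rw [beq_iff_eq, pvPyRange5] at hcond
      have hk : ∀ x ∈ [PySem.List.pyGetD L i 0, PySem.List.pyGetD L i 0 + 1,
          PySem.List.pyGetD L i 0 + 2, PySem.List.pyGetD L i 0 + 3, PySem.List.pyGetD L i 0 + 4],
          x ∈ S := by
        intro x hx
        exact (hmem x).mp (PySem.List.mem_of_mem_slice _ _ _ (by rw [hcond]; exact hx))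
      exact ⟨PySem.List.pyGetD L i 0, hk _ (by simp), hk _ (by simp), hk _ (by simp),
        hk _ (by simp), hk _ (by simp)⟩
    · rw [if_neg hlen] at hif
      exact absurd hif (by simp)
  · rintro ⟨v, hv, h1, h2, h3, h4⟩
    rw [← hmem] at hv h1 h2 h3 h4
    obtain ⟨i, hiL, hie⟩ := List.mem_iff_getElem.mp hv
    obtain ⟨hi1, e1⟩ := pvNextIdx L hpw hiL (by rw [hie]; exact h1)
    obtain ⟨hi2, e2⟩ := pvNextIdx L hpw hi1
      (by rw [e1, hie, show v + 1 + 1 = v + 2 by ring]; exact h2)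
    obtain ⟨hi3, e3⟩ := pvNextIdx L hpw hi2
      (by rw [e2, e1, hie, show v + 1 + 1 + 1 = v + 3 by ring]; exact h3)
    obtain ⟨hi4, e4⟩ := pvNextIdx L hpw hi3
      (by rw [e3, e2, e1, hie, show v + 1 + 1 + 1 + 1 = v + 4 by ring]; exact h4)
    have hn4 : i + 4 < L.length := by omega
    have hv1 : L[i + 1] = L[i] + 1 := e1
    have hv2 : L[i + 2] = L[i] + 2 := by have h' := e2; rw [e1] at h'; exact h'.trans (by ring)
    have hv3 : L[i + 3] = L[i] + 3 := by
      have h' := e3; rw [e2, e1] at h'; exact h'.trans (by ring)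
    have hv4 : L[i + 4] = L[i] + 4 := by
      have h' := e4; rw [e3, e2, e1] at h'; exact h'.trans (by ring)
    rw [if_pos (by omega), List.any_eq_true]
    refine ⟨(i : Int), ?_, ?_⟩
    · rw [PySem.List.mem_pyRange_one]
      refine ⟨by omega, by omega⟩
    · rw [beq_iff_eq, PySem.List.pyGetD_natCast, List.getD_eq_getElem L 0 (by omega),
        pvSlice5 L i hn4, pvPyRange5]
      simp [hv1, hv2, hv3, hv4]

-- bit k of the OR-fold mask is set iff k was ORed in (or was set initially)
theorem pvMaskBit (ys : List Nat) (m0 : Nat) (k : Nat) :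
    (ys.foldl (fun m v => m ||| (1 <<< v)) m0).testBit k = (m0.testBit k || decide (k ∈ ys)) := by
  induction ys generalizing m0 with
  | nil => simp
  | cons y ys ih =>
    simp only [List.foldl_cons, ih, Nat.testBit_or, List.mem_cons]
    rw [Nat.shiftLeft_eq, one_mul, Nat.testBit_two_pow]
    by_cases h : k = y <;> simp [h, eq_comm]

-- B's shifted-AND mask is nonzero iff a run of five consecutive values exists,
-- provided every value is ≥ 2 (so Int↔Nat via toNat is faithful)
theorem pvB_iff (xs : List Int) (hb : ∀ v ∈ xs, 2 ≤ v) :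
    ((let mask : Nat := (xs.map Int.toNat).foldl (fun m v => m ||| (1 <<< v)) 0
      let runs := mask &&& (mask >>> 1) &&& (mask >>> 2) &&& (mask >>> 3) &&& (mask >>> 4)
      runs != 0) = true) ↔ pvHasRun (PySem.Set.ofList xs) := by
  simp only [bne_iff_ne, ne_eq]
  have hSmem : ∀ a : Int, a ∈ PySem.Set.ofList xs ↔ a ∈ xs := fun a => PySem.Set.mem_ofList xs a
  have hbit : ∀ k : Nat,
      ((xs.map Int.toNat).foldl (fun m v => m ||| (1 <<< v)) 0).testBit k = true ↔ (k : Int) ∈ xs := by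
    intro k
    rw [pvMaskBit]
    simp only [Nat.zero_testBit, Bool.false_or, decide_eq_true_eq, List.mem_map]
    constructor
    · rintro ⟨v, hv, rfl⟩
      have := hb v hv
      have : ((v.toNat : Int)) = v := Int.toNat_of_nonneg (by omega)
      rwa [this]
    · intro hk
      exact ⟨(k : Int), hk, Int.toNat_natCast k⟩
  constructor
  · intro hne
    obtain ⟨k, hk⟩ := Nat.exists_testBit_of_ne_zero hne
    simp only [Nat.testBit_and, Nat.testBit_shiftRight, Bool.and_eq_true] at hk
    obtain ⟨⟨⟨⟨b0, b1⟩, b2⟩, b3⟩, b4⟩ := hk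
    refine ⟨(k : Int), (hSmem _).mpr ((hbit k).mp b0), ?_, ?_, ?_, ?_⟩ <;>
      [ (have := (hbit (k+1)).mp (by simpa [Nat.add_comm] using b1));
        (have := (hbit (k+2)).mp (by simpa [Nat.add_comm] using b2));
        (have := (hbit (k+3)).mp (by simpa [Nat.add_comm] using b3));
        (have := (hbit (k+4)).mp (by simpa [Nat.add_comm] using b4))] <;>
      · rw [hSmem]
        push_cast at this ⊢
        exact this
  · rintro ⟨v, hv, h1, h2, h3, h4⟩
    rw [hSmem] at hv h1 h2 h3 h4
    have hv2 := hb v hv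
    intro h0
    set M := (xs.map Int.toNat).foldl (fun m v => m ||| (1 <<< v)) 0 with hM
    have b0 : M.testBit v.toNat = true :=
      (hbit _).mpr (by rwa [Int.toNat_of_nonneg (by omega)])
    have b1 : M.testBit (v.toNat + 1) = true :=
      (hbit _).mpr (by rw [show ((v.toNat + 1 : Nat) : Int) = v + 1 by push_cast; omega]; exact h1)
    have b2 : M.testBit (v.toNat + 2) = true :=
      (hbit _).mpr (by rw [show ((v.toNat + 2 : Nat) : Int) = v + 2 by push_cast; omega]; exact h2)
    have b3 : M.testBit (v.toNat + 3) = true :=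
      (hbit _).mpr (by rw [show ((v.toNat + 3 : Nat) : Int) = v + 3 by push_cast; omega]; exact h3)
    have b4 : M.testBit (v.toNat + 4) = true :=
      (hbit _).mpr (by rw [show ((v.toNat + 4 : Nat) : Int) = v + 4 by push_cast; omega]; exact h4)
    have hrb : (M &&& (M >>> 1) &&& (M >>> 2) &&& (M >>> 3) &&& (M >>> 4)).testBit v.toNat = true := by
      simp only [Nat.testBit_and, Nat.testBit_shiftRight, Nat.add_comm, b0, b1, b2, b3, b4,
        Bool.and_self]
    rw [h0] at hrb
    simp at hrb

-- the two ports agree on any card list on which every card has a value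
theorem pvAgree (cards : List String)
    (hball : ∀ card ∈ cards, (pvCardValue? card).isSome = true) :
    (let values := PySem.List.sorted (PySem.Set.ofList (cards.map pvCardValue)) (fun x => x) false
     if 5 ≤ values.length then
       (PySem.List.pyRange 0 ((values.length : Int) - 4) 1).any (fun i =>
         PySem.List.slice values (some i) (some (i + 5)) ==
           PySem.List.pyRange (PySem.List.pyGetD values i 0) (PySem.List.pyGetD values i 0 + 5) 1)
     else false)
    = (let mask : Nat := cards.foldl (fun m card => m ||| (1 <<< (pvCardValue card).toNat)) 0
       let runs := mask &&& (mask >>> 1) &&& (mask >>> 2) &&& (mask >>> 3) &&& (mask >>> 4)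
       runs != 0) := by
  have hb : ∀ v ∈ cards.map pvCardValue, 2 ≤ v := by
    intro v hv
    obtain ⟨card, hcard, rfl⟩ := List.mem_map.mp hv
    obtain ⟨w, hw⟩ := Option.isSome_iff_exists.mp (hball card hcard)
    have := pvCardValueBounds hw
    simp only [pvCardValue, hw, Option.getD_some]
    omega
  have hfold : cards.foldl (fun m card => m ||| (1 <<< (pvCardValue card).toNat)) 0
      = ((cards.map pvCardValue).map Int.toNat).foldl (fun m v => m ||| (1 <<< v)) 0 := by
    simp [List.foldl_map]
  simp only [hfold]
  exact Bool.coe_iff_coe.mp ((pvA_iff (cards.map pvCardValue)).trans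
    (pvB_iff (cards.map pvCardValue) hb).symm)

-- ===== VERDICT (by name: the statement is the Claim_ definition above) =====
theorem is_straight_project_2_puntas_spec : Claim_equal_is_straight_project_2_puntas := by
  intro hand board _ hpre
  unfold Spec_is_straight_project_2_puntas is_straight_project_2_puntas
    is_straight_project_2_puntas_alt
  refine pvAgree (hand ++ pvFilterEmpty board) ?_
  rw [Pre_is_straight_project_2_puntas, List.all_eq_true] at hpre
  exact hpre
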